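-- pv_equiv track=rewrite | github.com/stpater77/office365-ai | brain-api/main.py | route_sources_match_user_intent
-- ===== SOURCE A (Python) =====
-- from typing import Any, Optional
--
-- def route_sources_match_user_intent(route: str, chunks: list[dict[str, Any]]) -> bool:
--     source_types = [str(c.get("source_type") or "").strip() for c in chunks]
--
--     if route == "training":
--         return any(s in {"outlook-training", "teams", "sharepoint"} for s in source_types)
--
--     if route == "developer":
--         return any(s in {"graph", "outlook-developer"} for s in source_types)
--
--     if route == "admin":
--         return any(s in {"m365-admin", "outlook-admin", "copilot"} for s in source_types)
--
--     if route == "teams":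
--         return any(s == "teams" for s in source_types)
--
--     if route == "sharepoint":
--         return any(s == "sharepoint" for s in source_types)
--
--     if route == "copilot":
--         return any(s == "copilot" for s in source_types)
--
--     return True
-- ===== SOURCE B (Python) =====
-- _KNOWN_ROUTES = ("training", "developer", "admin", "teams", "sharepoint", "copilot")
--
-- def _routes_for(source_type):
--     # Inverted index: which routes this source_type satisfies.
--     if source_type == "outlook-training":
--         return ("training",)
--     if source_type == "teams":
--         return ("training", "teams")
--     if source_type == "sharepoint":
--         return ("training", "sharepoint")
--     if source_type == "graph":
--         return ("developer",)
--     if source_type == "outlook-developer":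
--         return ("developer",)
--     if source_type == "m365-admin":
--         return ("admin",)
--     if source_type == "outlook-admin":
--         return ("admin",)
--     if source_type == "copilot":
--         return ("admin", "copilot")
--     return ()
--
-- def route_sources_match_user_intent(route: str, chunks: list) -> bool:
--     if route not in _KNOWN_ROUTES:
--         return True
--     satisfied = set()
--     for c in chunks:
--         satisfied.update(_routes_for(str(c.get("source_type") or "").strip()))
--     return route in satisfied
-- ===== Notes on version B (the rewrite author's own statement) =====
-- stated objective: alternative
-- what changed: Inverts the mapping: instead of A's six-way route ladder each scanning all chunk source types against a per-route allowed set, B uses an inverted index source_type->routes and one accumulator pass building the full set of routes satisfied by the chunks, finishing with a single membership test of the route (unknown routes still return True).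
import Mathlib
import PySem

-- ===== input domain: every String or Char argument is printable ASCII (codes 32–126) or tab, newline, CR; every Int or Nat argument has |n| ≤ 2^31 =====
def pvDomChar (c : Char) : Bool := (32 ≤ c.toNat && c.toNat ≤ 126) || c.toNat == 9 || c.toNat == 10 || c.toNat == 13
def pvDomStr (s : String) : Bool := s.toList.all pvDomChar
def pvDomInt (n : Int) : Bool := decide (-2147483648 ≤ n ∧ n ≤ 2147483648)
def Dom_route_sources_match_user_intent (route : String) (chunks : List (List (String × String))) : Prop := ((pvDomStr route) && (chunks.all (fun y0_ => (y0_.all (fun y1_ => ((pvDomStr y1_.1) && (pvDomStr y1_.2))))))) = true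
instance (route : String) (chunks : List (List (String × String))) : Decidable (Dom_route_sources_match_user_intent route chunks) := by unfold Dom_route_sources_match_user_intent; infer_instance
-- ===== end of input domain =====

-- B inverts the mapping: instead of A's six-way route ladder each scanning the source types
-- against a per-route allowed set, B maps each source_type to the routes it satisfies and
-- accumulates the set of satisfied routes in one pass, ending in a single membership test.

-- ===== PORT A =====
-- str(c.get("source_type") or "").strip(): values are strings here, so this is
-- first-match lookup, "" when missing (the empty string is falsy so `or ""` keeps ""), then strip.
def pvChunkSource (c : List (String × String)) : String :=
  PySem.Str.strip ((List.lookup "source_type" c).getD "")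

def route_sources_match_user_intent (route : String) (chunks : List (List (String × String))) : Bool :=
  let source_types := chunks.map pvChunkSource
  if route == "training" then
    source_types.any (fun s => s == "outlook-training" || s == "teams" || s == "sharepoint")
  else if route == "developer" then
    source_types.any (fun s => s == "graph" || s == "outlook-developer")
  else if route == "admin" then
    source_types.any (fun s => s == "m365-admin" || s == "outlook-admin" || s == "copilot")
  else if route == "teams" then
    source_types.any (fun s => s == "teams")
  else if route == "sharepoint" then
    source_types.any (fun s => s == "sharepoint")
  else if route == "copilot" then
    source_types.any (fun s => s == "copilot")
  else
    true

-- ===== PORT B =====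
def pvKnownRoutes : List String :=
  ["training", "developer", "admin", "teams", "sharepoint", "copilot"]

-- Inverted index: which routes this source_type satisfies.
def pvRoutesFor (source_type : String) : List String :=
  if source_type == "outlook-training" then ["training"]
  else if source_type == "teams" then ["training", "teams"]
  else if source_type == "sharepoint" then ["training", "sharepoint"]
  else if source_type == "graph" then ["developer"]
  else if source_type == "outlook-developer" then ["developer"]
  else if source_type == "m365-admin" then ["admin"]
  else if source_type == "outlook-admin" then ["admin"]
  else if source_type == "copilot" then ["admin", "copilot"]
  else []

def route_sources_match_user_intent_alt (route : String) (chunks : List (List (String × String))) : Bool :=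
  if !(pvKnownRoutes.contains route) then true
  else
    let satisfied : PySem.Set String :=
      chunks.foldl (fun acc c => PySem.Set.update acc (pvRoutesFor (pvChunkSource c)))
        PySem.Set.empty
    PySem.Set.contains satisfied route

-- ===== PRECONDITION & SPEC =====
def Spec_route_sources_match_user_intent (route : String) (chunks : List (List (String × String))) (out : Bool) : Prop := out = route_sources_match_user_intent_alt route chunks
instance (route : String) (chunks : List (List (String × String))) (out : Bool) : Decidable (Spec_route_sources_match_user_intent route chunks out) := by unfold Spec_route_sources_match_user_intent; infer_instance

-- ===== CLAIM (what is proved, stated in full; the proofs are below) =====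
def Claim_equal_route_sources_match_user_intent : Prop := ∀ (route : String) (chunks : List (List (String × String))), Dom_route_sources_match_user_intent route chunks → Spec_route_sources_match_user_intent route chunks (route_sources_match_user_intent route chunks)

-- ===== LEMMAS AND PROOFS =====

-- membership in a set accumulated by folding updates
theorem pvMemFoldUpdate {α β : Type} [BEq β] [LawfulBEq β] (r : β) (l : List α)
    (acc : PySem.Set β) (f : α → List β) :
    r ∈ l.foldl (fun acc c => PySem.Set.update acc (f c)) acc
      ↔ r ∈ acc ∨ ∃ c ∈ l, r ∈ f c := by
  induction l generalizing acc with
  | nil => simp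
  | cons c cs ih => simp [ih, PySem.Set.mem_update]; tauto

theorem pvPt_training (s : String) :
    "training" ∈ pvRoutesFor s ↔ (s = "outlook-training" ∨ s = "teams" ∨ s = "sharepoint") := by
  unfold pvRoutesFor; split_ifs <;> simp_all

theorem pvPt_developer (s : String) :
    "developer" ∈ pvRoutesFor s ↔ (s = "graph" ∨ s = "outlook-developer") := by
  unfold pvRoutesFor; split_ifs <;> simp_all

theorem pvPt_admin (s : String) :
    "admin" ∈ pvRoutesFor s ↔ (s = "m365-admin" ∨ s = "outlook-admin" ∨ s = "copilot") := by
  unfold pvRoutesFor; split_ifs <;> simp_all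

theorem pvPt_teams (s : String) : "teams" ∈ pvRoutesFor s ↔ s = "teams" := by
  unfold pvRoutesFor; split_ifs <;> simp_all

theorem pvPt_sharepoint (s : String) : "sharepoint" ∈ pvRoutesFor s ↔ s = "sharepoint" := by
  unfold pvRoutesFor; split_ifs <;> simp_all

theorem pvPt_copilot (s : String) : "copilot" ∈ pvRoutesFor s ↔ s = "copilot" := by
  unfold pvRoutesFor; split_ifs <;> simp_all

-- ===== VERDICT (by name: the statement is the Claim_ definition above) =====
set_option maxRecDepth 8192 in
theorem route_sources_match_user_intent_spec : Claim_equal_route_sources_match_user_intent := by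
  intro route chunks _
  unfold Spec_route_sources_match_user_intent route_sources_match_user_intent
    route_sources_match_user_intent_alt
  by_cases h1 : route = "training"
  · subst h1
    rw [show (pvKnownRoutes.contains "training") = true by decide, Bool.eq_iff_iff]
    simp [pvMemFoldUpdate, PySem.Set.empty,
      List.any_map, List.any_eq_true, Function.comp_def, pvPt_training, or_assoc]
  · by_cases h2 : route = "developer"
    · subst h2
      rw [show (pvKnownRoutes.contains "developer") = true by decide, Bool.eq_iff_iff]
      simp [pvMemFoldUpdate, PySem.Set.empty,
        List.any_map, List.any_eq_true, Function.comp_def, pvPt_developer]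
    · by_cases h3 : route = "admin"
      · subst h3
        rw [show (pvKnownRoutes.contains "admin") = true by decide, Bool.eq_iff_iff]
        simp [pvMemFoldUpdate, PySem.Set.empty,
          List.any_map, List.any_eq_true, Function.comp_def, pvPt_admin, or_assoc]
      · by_cases h4 : route = "teams"
        · subst h4
          rw [show (pvKnownRoutes.contains "teams") = true by decide, Bool.eq_iff_iff]
          simp [pvMemFoldUpdate, PySem.Set.empty,
            List.any_map, List.any_eq_true, Function.comp_def, pvPt_teams]
        · by_cases h5 : route = "sharepoint"
          · subst h5
            rw [show (pvKnownRoutes.contains "sharepoint") = true by decide, Bool.eq_iff_iff]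
            simp [pvMemFoldUpdate, PySem.Set.empty,
              List.any_map, List.any_eq_true, Function.comp_def, pvPt_sharepoint]
          · by_cases h6 : route = "copilot"
            · subst h6
              rw [show (pvKnownRoutes.contains "copilot") = true by decide, Bool.eq_iff_iff]
              simp [pvMemFoldUpdate, PySem.Set.empty,
                List.any_map, List.any_eq_true, Function.comp_def, pvPt_copilot]
            · rw [show (pvKnownRoutes.contains route) = false by
                  simp [pvKnownRoutes, h1, h2, h3, h4, h5, h6]]
              simp [h1, h2, h3, h4, h5, h6]
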